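-- pv_equiv track=rewrite | github.com/nadxelleHernandez/algorithm_practice | algorithm_practice/arrays_algorithms.py | has_balanced_sum
-- ===== SOURCE A (Python) =====
-- def has_balanced_sum(array):
--     if not array:
--         return False
--
--     array_len = len(array)
--
--     if array_len==1:
--         return True
--
--     right_sum = 0
--     left_sum = 0
--     for i in range(1,array_len):
--         for j in range(i):
--             right_sum+=array[j]
--         for j in range(i,array_len):
--             left_sum+=array[j]
--         if right_sum==left_sum:
--             return True
--         right_sum = 0
--         left_sum = 0
--     return False
-- ===== SOURCE B (Python) =====
-- def has_balanced_sum(array):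
--     if not array:
--         return False
--     if len(array) == 1:
--         return True
--     total = sum(array)
--     left = 0
--     for x in array[:-1]:
--         left += x
--         if 2 * left == total:
--             return True
--     return False
-- ===== Notes on version B (the rewrite author's own statement) =====
-- stated objective: faster
-- what changed: Replaces the quadratic re-summation of both halves at every split point with a single pass that keeps a running prefix sum and compares its double against the precomputed total.
import Mathlib
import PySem

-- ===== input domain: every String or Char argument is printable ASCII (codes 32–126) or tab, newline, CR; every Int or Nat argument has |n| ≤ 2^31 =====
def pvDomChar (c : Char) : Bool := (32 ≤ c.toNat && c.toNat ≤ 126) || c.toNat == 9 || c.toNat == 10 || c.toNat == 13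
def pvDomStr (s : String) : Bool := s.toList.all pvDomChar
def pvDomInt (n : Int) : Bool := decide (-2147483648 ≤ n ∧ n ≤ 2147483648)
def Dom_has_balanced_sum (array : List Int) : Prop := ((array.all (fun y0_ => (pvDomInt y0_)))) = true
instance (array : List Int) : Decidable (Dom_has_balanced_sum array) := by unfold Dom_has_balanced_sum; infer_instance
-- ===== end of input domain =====

-- B replaces A's O(n^2) re-summation of both halves at every split point by one
-- O(n) pass comparing twice the running prefix sum with the precomputed total.

-- ===== PORT A =====
-- Port of A: for each split point i in range(1, n), re-sums array[0:i] and array[i:n]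
-- and early-returns True on equality (Option Bool models the early return).
def has_balanced_sum (array : List Int) : Bool :=
  if array = [] then false
  else
    let array_len := array.length
    if array_len == 1 then true
    else
      ((PySem.List.pyRange 1 (array_len : Int) 1).foldl
        (fun (st : Option Bool) i =>
          match st with
          | some c => some c
          | none =>
            let right_sum := (PySem.List.pyRange 0 i 1).foldl
              (fun s j => s + PySem.List.pyGetD array j 0) 0
            let left_sum := (PySem.List.pyRange i (array_len : Int) 1).foldl
              (fun s j => s + PySem.List.pyGetD array j 0) 0
            if right_sum == left_sum then some true else none) none).getD false

-- ===== PORT B =====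
-- Port of B (Source B): precompute total = sum(array), then one pass over array[:-1]
-- with a running prefix sum, early-returning when 2*left == total.
def has_balanced_sum_alt (array : List Int) : Bool :=
  if array = [] then false
  else if array.length == 1 then true
  else
    let total := array.sum
    ((PySem.List.slice array none (some (-1))).foldl
      (fun (st : Int × Option Bool) x =>
        match st.2 with
        | some b => (st.1, some b)
        | none =>
          let left := st.1 + x
          (left, if 2 * left == total then some true else none)) (0, none)).2.getD false

-- ===== PRECONDITION & SPEC =====
def Spec_has_balanced_sum (array : List Int) (out : Bool) : Prop := out = has_balanced_sum_alt array
instance (array : List Int) (out : Bool) : Decidable (Spec_has_balanced_sum array out) := by unfold Spec_has_balanced_sum; infer_instance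

-- ===== CLAIM (what is proved, stated in full; the proofs are below) =====
def Claim_equal_has_balanced_sum : Prop := ∀ (array : List Int), Dom_has_balanced_sum array → Spec_has_balanced_sum array (has_balanced_sum array)

-- ===== LEMMAS AND PROOFS =====

lemma map_getD_range (xs : List Int) (n : Nat) (h : n ≤ xs.length) :
    (List.range n).map (fun k => xs.getD k 0) = xs.take n := by
  induction n with
  | zero => simp
  | succ m ih =>
    rw [List.range_succ, List.map_append, ih (by omega), List.take_add_one]
    simp [List.getD, List.getElem?_eq_getElem (show m < xs.length by omega)]

lemma foldl_range_prefix_sum (xs : List Int) (i : Int) (h0 : 0 ≤ i) (h : i ≤ xs.length) :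
    (PySem.List.pyRange 0 i 1).foldl (fun s j => s + PySem.List.pyGetD xs j 0) 0
      = (xs.take i.toNat).sum := by
  rw [PySem.List.pyRange_one, List.foldl_map]
  have : ∀ k : Nat, PySem.List.pyGetD xs ((0:Int) + k) 0 = xs.getD k 0 := by
    intro k; simp
  simp only [this]
  rw [← map_getD_range xs i.toNat (by omega), ← List.foldl_map]
  rw [List.sum_eq_foldl]
  norm_num

lemma foldl_range_suffix_sum (xs : List Int) (i : Int) (h0 : 0 ≤ i) :
    (PySem.List.pyRange i (xs.length : Int) 1).foldl (fun s j => s + PySem.List.pyGetD xs j 0) 0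
      = (xs.drop i.toNat).sum := by
  have := PySem.List.foldl_pyRange_pyGetD xs 0 (fun s x => s + x) 0 h0 (a := i)
  simp only [PySem.List.len_eq] at this
  rw [this, List.sum_eq_foldl]

lemma foldl_first_frozen (l : List Int) (p : Int → Bool) (b : Bool) :
    (l.foldl (fun (st : Option Bool) i =>
      match st with
      | some c => some c
      | none => if p i then some true else none) (some b)) = some b := by
  induction l with
  | nil => rfl
  | cons x l ih => simpa using ih

lemma foldl_first_any (l : List Int) (p : Int → Bool) :
    ((l.foldl (fun (st : Option Bool) i =>
      match st with
      | some c => some c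
      | none => if p i then some true else none) none).getD false) = l.any p := by
  induction l with
  | nil => rfl
  | cons x l ih =>
    by_cases h : p x
    · simp [List.foldl_cons, h, foldl_first_frozen]
    · simp [List.foldl_cons, h, ih]

lemma foldl_scan_frozen (total : Int) (l : List Int) (a : Int) (b : Bool) :
    (l.foldl (fun (st : Int × Option Bool) x =>
      match st.2 with
      | some c => (st.1, some c)
      | none => (st.1 + x, if 2 * (st.1 + x) == total then some true else none)) (a, some b))
      = (a, some b) := by
  induction l with
  | nil => rfl
  | cons x l ih => simpa using ih

lemma foldl_scan_any (total : Int) (l : List Int) (c : Int) :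
    ((l.foldl (fun (st : Int × Option Bool) x =>
      match st.2 with
      | some b => (st.1, some b)
      | none => (st.1 + x, if 2 * (st.1 + x) == total then some true else none)) (c, none)).2.getD false)
      = (List.range l.length).any (fun k => 2 * (c + (l.take (k+1)).sum) == total) := by
  induction l generalizing c with
  | nil => rfl
  | cons x l ih =>
    rw [List.length_cons, List.range_succ_eq_map]
    by_cases h : (2 * (c + x) == total) = true
    · rw [List.foldl_cons]
      simp only [h, if_true]
      rw [foldl_scan_frozen]
      simp [List.any_cons]
      exact Or.inl (by simpa using h)
    · rw [List.foldl_cons]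
      simp only [Bool.not_eq_true] at h
      simp only [h, Bool.false_eq_true, if_false]
      rw [ih (c + x)]
      simp only [List.any_cons, List.any_map]
      have h0 : (2 * (c + (List.take 1 (x :: l)).sum) == total) = false := by
        simpa using h
      rw [show (List.take (0+1) (x :: l)) = [x] by simp]
      simp only [List.sum_cons, List.sum_nil, add_zero, h, Bool.false_or]
      apply List.any_congr rfl
      intro k
      simp only [Function.comp, Nat.succ_eq_add_one, List.take_succ_cons, List.sum_cons]
      congr 1
      ring_nf

lemma any_congr_mem {α : Type} (l : List α) (p q : α → Bool) (h : ∀ x ∈ l, p x = q x) :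
    l.any p = l.any q := by
  induction l with
  | nil => rfl
  | cons x l ih =>
    simp only [List.any_cons, h x (by simp), ih (fun y hy => h y (by simp [hy]))]

lemma ports_agree (array : List Int) : has_balanced_sum array = has_balanced_sum_alt array := by
  unfold has_balanced_sum has_balanced_sum_alt
  by_cases hnil : array = []
  · simp [hnil]
  · simp only [hnil, if_false]
    by_cases h1 : array.length == 1
    · simp [h1]
    · simp only [h1, Bool.false_eq_true, if_false]
      have hlen : 2 ≤ array.length := by
        rcases array with _ | ⟨a, _ | ⟨b, t⟩⟩ <;> simp_all
      rw [foldl_first_any, PySem.List.slice_to_neg_one, foldl_scan_any,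
          PySem.List.pyRange_one, List.any_map, List.length_dropLast]
      have hcard : ((array.length : Int) - 1).toNat = array.length - 1 := by omega
      rw [hcard]
      apply any_congr_mem
      intro k hk
      have hk' : k < array.length - 1 := List.mem_range.mp hk
      have hi0 : (0:Int) ≤ 1 + (k:Int) := by omega
      have hi1 : (1 + (k:Int)) ≤ array.length := by omega
      simp only [Function.comp]
      rw [foldl_range_prefix_sum array _ hi0 hi1, foldl_range_suffix_sum array _ hi0]
      have htn : ((1:Int) + (k:Int)).toNat = k + 1 := by omega
      rw [htn]
      have hdl : array.dropLast.take (k+1) = array.take (k+1) := by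
        rw [List.dropLast_eq_take, List.take_take]
        congr 1; omega
      rw [hdl]
      have hsum : (array.take (k+1)).sum + (array.drop (k+1)).sum = array.sum := by
        rw [← List.sum_append, List.take_append_drop]
      rw [Bool.eq_iff_iff]
      simp only [beq_iff_eq]
      omega

-- ===== VERDICT (by name: the statement is the Claim_ definition above) =====
theorem has_balanced_sum_spec : Claim_equal_has_balanced_sum := by
  intro array _
  unfold Spec_has_balanced_sum
  exact ports_agree array
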